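-- pv_equiv track=rewrite | github.com/synaptent/RingRift | ai-service/scripts/run_parallel_self_play.py | distribute_games_to_workers
-- ===== SOURCE A (Python) =====
-- from typing import List, Optional, Tuple
--
-- def distribute_games_to_workers(
--     num_games: int,
--     num_workers: int,
-- ) -> List[List[int]]:
--     """Distribute game indices evenly across workers.
--
--     Returns:
--         List of game index lists, one per worker
--     """
--     games_per_worker = num_games // num_workers
--     remainder = num_games % num_workers
--
--     distributions = []
--     current_idx = 0
--
--     for worker_id in range(num_workers):
--         # Give one extra game to earlier workers if there's a remainder
--         worker_games = games_per_worker + (1 if worker_id < remainder else 0)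
--         game_indices = list(range(current_idx, current_idx + worker_games))
--         distributions.append(game_indices)
--         current_idx += worker_games
--
--     return distributions
-- ===== SOURCE B (Python) =====
-- def distribute_games_to_workers(num_games, num_workers):
--     """Distribute game indices evenly across workers (closed-form per worker)."""
--     q, r = divmod(num_games, num_workers)
--     return [
--         list(range(i * q + min(i, r), i * q + min(i, r) + q + (1 if i < r else 0)))
--         for i in range(num_workers)
--     ]
-- ===== Notes on version B (the rewrite author's own statement) =====
-- stated objective: alternative
-- what changed: Replaces the running current_idx accumulator loop with a closed-form start index per worker (start = i*q + min(i, r)) expressed as a list comprehension.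
import Mathlib
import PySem

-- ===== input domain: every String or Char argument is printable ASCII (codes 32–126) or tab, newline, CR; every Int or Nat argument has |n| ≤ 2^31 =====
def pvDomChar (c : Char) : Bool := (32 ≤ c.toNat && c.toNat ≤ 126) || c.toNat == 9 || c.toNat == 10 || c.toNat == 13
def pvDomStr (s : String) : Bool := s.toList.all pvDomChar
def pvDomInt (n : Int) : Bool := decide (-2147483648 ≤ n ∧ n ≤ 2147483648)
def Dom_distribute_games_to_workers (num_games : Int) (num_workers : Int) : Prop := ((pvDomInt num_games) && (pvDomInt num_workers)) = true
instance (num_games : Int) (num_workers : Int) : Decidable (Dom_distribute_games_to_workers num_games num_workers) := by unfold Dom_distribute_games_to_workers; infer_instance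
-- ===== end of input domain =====

-- B replaces A's running current_idx accumulator with a closed-form start index per worker
-- (start = i*q + min(i,r)) computed by a map instead of a fold (objective: alternative decomposition).

-- ===== PORT A =====
def distribute_games_to_workers (num_games : Int) (num_workers : Int) : List (List Int) :=
  let games_per_worker := PySem.Int.floordiv num_games num_workers
  let remainder := PySem.Int.mod num_games num_workers
  let st := (PySem.List.pyRange 0 num_workers 1).foldl
    (fun (st : List (List Int) × Int) worker_id =>
      let worker_games := games_per_worker + (if worker_id < remainder then (1:Int) else 0)
      let game_indices := PySem.List.pyRange st.2 (st.2 + worker_games) 1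
      (st.1 ++ [game_indices], st.2 + worker_games))
    ([], 0)
  st.1

-- ===== PORT B =====
def distribute_games_to_workers_alt (num_games : Int) (num_workers : Int) : List (List Int) :=
  let q := PySem.Int.floordiv num_games num_workers
  let r := PySem.Int.mod num_games num_workers
  (PySem.List.pyRange 0 num_workers 1).map (fun i =>
    PySem.List.pyRange (i * q + min i r) (i * q + min i r + (q + (if i < r then (1:Int) else 0))) 1)

-- ===== PRECONDITION & SPEC =====
-- Pre_ excludes exactly num_workers = 0, where Python A raises ZeroDivisionError.
def Pre_distribute_games_to_workers (num_games : Int) (num_workers : Int) : Prop := num_workers ≠ 0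
instance (num_games : Int) (num_workers : Int) : Decidable (Pre_distribute_games_to_workers num_games num_workers) := by unfold Pre_distribute_games_to_workers; infer_instance
def pvWitness_distribute_games_to_workers : Int × Int := (7, 3)

def Spec_distribute_games_to_workers (num_games : Int) (num_workers : Int) (out : List (List Int)) : Prop := out = distribute_games_to_workers_alt num_games num_workers
instance (num_games : Int) (num_workers : Int) (out : List (List Int)) : Decidable (Spec_distribute_games_to_workers num_games num_workers out) := by unfold Spec_distribute_games_to_workers; infer_instance

-- ===== CLAIM (what is proved, stated in full; the proofs are below) =====
def Claim_equal_distribute_games_to_workers : Prop := ∀ (num_games : Int) (num_workers : Int), Dom_distribute_games_to_workers num_games num_workers → Pre_distribute_games_to_workers num_games num_workers → Spec_distribute_games_to_workers num_games num_workers (distribute_games_to_workers num_games num_workers)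

-- ===== LEMMAS AND PROOFS =====

-- A's loop, started at worker i with current_idx = i*q + min i r and accumulator acc,
-- produces acc ++ the closed-form chunks of workers i..n-1 (induction on the fuel k = (n-i).toNat).
theorem pv_loop_invariant (q r : Int) (k : Nat) :
    ∀ (n i : Int) (acc : List (List Int)), 0 ≤ i → (n - i).toNat = k →
    ((PySem.List.pyRange i n 1).foldl
      (fun (st : List (List Int) × Int) worker_id =>
        let worker_games := q + (if worker_id < r then (1:Int) else 0)
        (st.1 ++ [PySem.List.pyRange st.2 (st.2 + worker_games) 1], st.2 + worker_games))
      (acc, i * q + min i r)).1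
    = acc ++ (PySem.List.pyRange i n 1).map (fun j =>
        PySem.List.pyRange (j * q + min j r) (j * q + min j r + (q + (if j < r then (1:Int) else 0))) 1) := by
  induction k with
  | zero =>
    intro n i acc _ hk
    have hempty : PySem.List.pyRange i n 1 = [] := by
      rw [PySem.List.pyRange_one, hk]
      simp
    rw [hempty]
    simp
  | succ k ih =>
    intro n i acc hi hk
    have h : i < n := by omega
    rw [PySem.List.pyRange_one_cons h]
    simp only [List.foldl_cons, List.map_cons]
    have hstep : i * q + min i r + (q + (if i < r then (1:Int) else 0))
        = (i + 1) * q + min (i + 1) r := by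
      split_ifs with hir
      · rw [min_eq_left (le_of_lt hir), min_eq_left (by omega : i + 1 ≤ r)]; ring
      · rw [min_eq_right (by omega : r ≤ i), min_eq_right (by omega : r ≤ i + 1)]; ring
    rw [hstep]
    rw [ih n (i + 1)
      (acc ++ [PySem.List.pyRange (i * q + min i r) ((i + 1) * q + min (i + 1) r) 1])
      (by omega) (by omega)]
    simp

-- ===== VERDICT (by name: the statement is the Claim_ definition above) =====
theorem distribute_games_to_workers_spec : Claim_equal_distribute_games_to_workers := by
  intro num_games num_workers _ hpre
  unfold Spec_distribute_games_to_workers distribute_games_to_workers distribute_games_to_workers_alt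
  by_cases hpos : 0 < num_workers
  · have hr : 0 ≤ PySem.Int.mod num_games num_workers := PySem.Int.mod_nonneg _ hpos
    have h := pv_loop_invariant (PySem.Int.floordiv num_games num_workers)
      (PySem.Int.mod num_games num_workers) (num_workers - 0).toNat num_workers 0 [] le_rfl rfl
    rw [min_eq_left hr] at h
    simpa using h
  · have hneg : num_workers < 0 := by
      unfold Pre_distribute_games_to_workers at hpre; omega
    have hempty : PySem.List.pyRange 0 num_workers 1 = [] := by
      rw [PySem.List.pyRange_one]
      simp
      omega
    simp [hempty]
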